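-- pv_equiv track=rewrite | github.com/Aditidas-03/Rosalind3 | Rosalind3/eubt/eubt.py | unrooted_bin_tree
-- ===== SOURCE A (Python) =====
-- def unrooted_bin_tree(list, n_taxa):
--     n_tree = []
--     for i in range(1,len(list)-2):#starting from index 1 and ending at the second-to-last index.
--         j = -1
--         if not list[i] in '(),;':#checks if the current element at index i is not one of '(),;'. If true, it sets j to the current index i.
--             j = i
--         if list[i]=='(':
--             counter=1#if yes a counter m to  iterates from the next index (i + 1) to find the  closing parenthesis.
--             for j in range(i+1, len(list)):
--                 if list[j]=='(':
--                     counter +=1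
--                 elif list[j]==')':
--                     counter -=1
--                 if counter == 0:
--                     break# m becomes 0, indicating the closing parenthesis.
--         if j!=-1:#then  position to insert the new taxa
--             t =  list[:i] + ['('] + list[i:j+1] + [','] + [n_taxa] + [')'] + list[j+1:]
--             n_tree.append(t)
--     return n_tree
-- ===== SOURCE B (Python) =====
-- def unrooted_bin_tree(list, n_taxa):
--     # Alternative strategy: one pass builds a table mapping each '(' index to its
--     # matching ')' index; the insertion loop then looks j up instead of rescanning
--     # forward each time (building the spliced outputs dominates the cost either way).
--     n = len(list)
--     match = {}
--     stack = []
--     for k in range(n):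
--         if list[k] == '(':
--             stack.append(k)
--         elif list[k] == ')':
--             if stack:
--                 match[stack.pop()] = k
--     n_tree = []
--     for i in range(1, n - 2):
--         if list[i] == '(':
--             j = match.get(i, n - 1)
--         elif list[i] in '(),;':
--             continue
--         else:
--             j = i
--         n_tree.append(list[:i] + ['('] + list[i:j+1] + [',', n_taxa, ')'] + list[j+1:])
--     return n_tree
-- ===== Notes on version B (the rewrite author's own statement) =====
-- stated objective: alternative
-- what changed: Instead of rescanning forward from every '(' with a counter to find its matching ')', B does one left-to-right stack pass that precomputes a table mapping each '(' index to its matching ')' index, and the insertion loop splices by table lookup (default len-1 reproducing A's fallback for an unmatched '('); building the spliced output lists dominates the running time of both.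
import Mathlib
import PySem

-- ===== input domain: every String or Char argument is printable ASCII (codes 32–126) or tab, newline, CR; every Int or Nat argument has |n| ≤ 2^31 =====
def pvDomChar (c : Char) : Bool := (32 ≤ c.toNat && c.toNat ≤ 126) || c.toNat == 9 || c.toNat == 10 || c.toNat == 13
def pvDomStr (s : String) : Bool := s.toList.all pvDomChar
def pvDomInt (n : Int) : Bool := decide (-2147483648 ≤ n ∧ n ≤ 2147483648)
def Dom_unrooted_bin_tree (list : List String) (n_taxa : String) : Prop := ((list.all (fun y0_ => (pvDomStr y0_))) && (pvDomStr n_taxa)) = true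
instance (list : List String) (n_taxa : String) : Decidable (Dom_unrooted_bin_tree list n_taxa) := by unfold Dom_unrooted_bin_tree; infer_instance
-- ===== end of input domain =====

-- B replaces A's per-position forward rescan for the matching ')' by one stack pass that
-- precomputes a match table, then splices by table lookup (objective: alternative algorithm;
-- building the spliced outputs dominates the cost of both).

-- ===== PORT A =====
-- A's inner `for j in range(i+1, len(list))` loop: walks the suffix carrying the same
-- counter and the current index k; returns Python's final j (the break index, or the
-- last index len-1 when the loop runs out without the counter reaching 0).
def ubtScan : List String → Int → Int → Int
  | [], _, k => k - 1
  | e :: es, counter, k =>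
    let c := if e = "(" then counter + 1 else if e = ")" then counter - 1 else counter
    if c = 0 then k else ubtScan es c (k + 1)

def unrooted_bin_tree (list : List String) (n_taxa : String) : List (List String) :=
  (PySem.List.pyRange 1 ((list.length : Int) - 2) 1).foldl (fun n_tree i =>
    let j : Int :=
      if PySem.List.pyGetD list i "" = "(" then
        ubtScan (PySem.List.slice list (some (i + 1)) none) 1 (i + 1)
      else if ¬ (PySem.Str.isIn (PySem.List.pyGetD list i "") "(),;" = true) then i else -1
    if j ≠ -1 then
      n_tree ++ [PySem.List.slice list none (some i) ++ ["("] ++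
        PySem.List.slice list (some i) (some (j + 1)) ++ [","] ++ [n_taxa] ++ [")"] ++
        PySem.List.slice list (some (j + 1)) none]
    else n_tree) []

-- ===== PORT B =====
-- B's first pass: push indices of '(' on a stack, pop on ')' recording the match.
-- Returns the (stack, match-table) state after the walked elements.
def ubtMatch : List String → Int → List Int → PySem.Dict Int Int → (List Int × PySem.Dict Int Int)
  | [], _, stack, m => (stack, m)
  | e :: es, k, stack, m =>
    if e = "(" then ubtMatch es (k + 1) (k :: stack) m
    else if e = ")" then
      match stack with
      | [] => ubtMatch es (k + 1) [] m
      | t :: rest => ubtMatch es (k + 1) rest (m.insert t k)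
    else ubtMatch es (k + 1) stack m

def unrooted_bin_tree_alt (list : List String) (n_taxa : String) : List (List String) :=
  let n : Int := list.length
  let m := (ubtMatch list 0 [] PySem.Dict.empty).2
  (PySem.List.pyRange 1 (n - 2) 1).foldl (fun n_tree i =>
    if PySem.List.pyGetD list i "" = "(" then
      let j := (m.get? i).getD (n - 1)
      n_tree ++ [PySem.List.slice list none (some i) ++ ["("] ++
        PySem.List.slice list (some i) (some (j + 1)) ++ [","] ++ [n_taxa] ++ [")"] ++
        PySem.List.slice list (some (j + 1)) none]
    else if PySem.Str.isIn (PySem.List.pyGetD list i "") "(),;" = true then n_tree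
    else
      n_tree ++ [PySem.List.slice list none (some i) ++ ["("] ++
        PySem.List.slice list (some i) (some (i + 1)) ++ [","] ++ [n_taxa] ++ [")"] ++
        PySem.List.slice list (some (i + 1)) none]) []

-- ===== PRECONDITION & SPEC =====
def Spec_unrooted_bin_tree (list : List String) (n_taxa : String) (out : List (List String)) : Prop := out = unrooted_bin_tree_alt list n_taxa
instance (list : List String) (n_taxa : String) (out : List (List String)) : Decidable (Spec_unrooted_bin_tree list n_taxa out) := by unfold Spec_unrooted_bin_tree; infer_instance

-- ===== CLAIM (what is proved, stated in full; the proofs are below) =====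
def Claim_equal_unrooted_bin_tree : Prop := ∀ (list : List String) (n_taxa : String), Dom_unrooted_bin_tree list n_taxa → Spec_unrooted_bin_tree list n_taxa (unrooted_bin_tree list n_taxa)

-- ===== LEMMAS AND PROOFS =====

-- the break position of A's scan as an Option: some j at the first index where the
-- counter reaches 0, none if the suffix runs out.
def optScan : List String → Int → Int → Option Int
  | [], _, _ => none
  | e :: es, counter, k =>
    let c := if e = "(" then counter + 1 else if e = ")" then counter - 1 else counter
    if c = 0 then some k else optScan es c (k + 1)

theorem ubtScan_eq_optScan (es : List String) (c k : Int) :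
    ubtScan es c k = (optScan es c k).getD (k + es.length - 1) := by
  induction es generalizing c k with
  | nil => simp [ubtScan, optScan]
  | cons e es ih =>
    simp only [ubtScan, optScan]
    set c' := if e = "(" then c + 1 else if e = ")" then c - 1 else c with hc
    by_cases h0 : c' = 0
    · simp [h0]
    · simp only [if_neg h0]
      rw [ih]
      rcases h : optScan es c' (k + 1) with _ | j <;> simp [List.length_cons] <;> omega

theorem ubtScan_ge (es : List String) (c k : Int) : k - 1 ≤ ubtScan es c k := by
  induction es generalizing c k with
  | nil => simp [ubtScan]
  | cons e es ih =>
    simp only [ubtScan]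
    set c' := if e = "(" then c + 1 else if e = ")" then c - 1 else c with hc
    by_cases h0 : c' = 0
    · simp [h0]
    · simp only [if_neg h0]; have := ih c' (k + 1); omega

theorem ubtMatch_append (pre suf : List String) (k : Int) (st : List Int) (d : PySem.Dict Int Int) :
    ubtMatch (pre ++ suf) k st d =
      ubtMatch suf (k + pre.length) (ubtMatch pre k st d).1 (ubtMatch pre k st d).2 := by
  induction pre generalizing k st d with
  | nil => simp [ubtMatch]
  | cons e es ih =>
    have harith : k + ((e :: es).length : Int) = (k + 1) + (es.length : Int) := by
      simp only [List.length_cons]; push_cast; ring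
    rw [harith]
    show ubtMatch (e :: (es ++ suf)) k st d = _
    by_cases h1 : e = "("
    · rw [show ubtMatch (e :: (es ++ suf)) k st d = ubtMatch (es ++ suf) (k + 1) (k :: st) d by
        simp [ubtMatch, h1],
        show ubtMatch (e :: es) k st d = ubtMatch es (k + 1) (k :: st) d by simp [ubtMatch, h1]]
      exact ih ..
    · by_cases h2 : e = ")"
      · cases st with
        | nil =>
          rw [show ubtMatch (e :: (es ++ suf)) k [] d = ubtMatch (es ++ suf) (k + 1) [] d by
            simp [ubtMatch, h1, h2],
            show ubtMatch (e :: es) k [] d = ubtMatch es (k + 1) [] d by simp [ubtMatch, h1, h2]]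
          exact ih ..
        | cons t rest =>
          rw [show ubtMatch (e :: (es ++ suf)) k (t :: rest) d
              = ubtMatch (es ++ suf) (k + 1) rest (d.insert t k) by simp [ubtMatch, h1, h2],
            show ubtMatch (e :: es) k (t :: rest) d = ubtMatch es (k + 1) rest (d.insert t k) by
              simp [ubtMatch, h1, h2]]
          exact ih ..
      · rw [show ubtMatch (e :: (es ++ suf)) k st d = ubtMatch (es ++ suf) (k + 1) st d by
          simp [ubtMatch, h1, h2],
          show ubtMatch (e :: es) k st d = ubtMatch es (k + 1) st d by simp [ubtMatch, h1, h2]]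
        exact ih ..

-- an already-recorded match survives the rest of the pass
theorem ubtMatch_persist (es : List String) (k : Int) (st : List Int) (d : PySem.Dict Int Int)
    (s v : Int) (hs : s ∉ st) (hsk : s < k) (hst : ∀ a ∈ st, a < k)
    (hv : d.get? s = some v) : (ubtMatch es k st d).2.get? s = some v := by
  induction es generalizing k st d with
  | nil => simpa [ubtMatch]
  | cons e es ih =>
    simp only [ubtMatch]
    by_cases h1 : e = "("
    · simp only [if_pos h1]
      refine ih (k + 1) (k :: st) d ?_ (by omega) ?_ hv
      · simp only [List.mem_cons, not_or]; exact ⟨by omega, hs⟩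
      · intro a ha; rcases List.mem_cons.1 ha with rfl | ha
        · omega
        · have := hst a ha; omega
    · by_cases h2 : e = ")"
      · simp only [if_neg h1, if_pos h2]
        cases st with
        | nil => exact ih (k + 1) [] d (by simp) (by omega) (by simp) hv
        | cons t rest =>
          refine ih (k + 1) rest (d.insert t k) ?_ (by omega) ?_ ?_
          · exact fun h => hs (List.mem_cons_of_mem _ h)
          · intro a ha; have := hst a (List.mem_cons_of_mem _ ha); omega
          · rw [PySem.Dict.get?_insert_of_ne]
            · exact hv
            · intro h; exact hs (h ▸ List.mem_cons_self ..)
      · simp only [if_neg h1, if_neg h2]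
        exact ih (k + 1) st d hs (by omega) (fun a ha => by have := hst a ha; omega) hv

-- the state invariant of the first pass
theorem ubtMatch_inv (pre : List String) (k : Int) (st : List Int) (d : PySem.Dict Int Int)
    (hst : ∀ a ∈ st, a < k) (hp : st.Pairwise (· > ·))
    (hd : ∀ q : Int, k ≤ q → d.get? q = none) :
    (∀ a ∈ (ubtMatch pre k st d).1, a < k + pre.length) ∧
    (ubtMatch pre k st d).1.Pairwise (· > ·) ∧
    (∀ q : Int, k + pre.length ≤ q → (ubtMatch pre k st d).2.get? q = none) := by
  induction pre generalizing k st d with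
  | nil =>
    refine ⟨fun a ha => ?_, by simpa [ubtMatch], fun q hq => ?_⟩
    · simp only [ubtMatch] at ha; have := hst a ha; simp; omega
    · simp only [ubtMatch]; exact hd q (by simpa using hq)
  | cons e es ih =>
    have hlen : k + ((e :: es).length : Int) = (k + 1) + (es.length : Int) := by
      simp only [List.length_cons]; push_cast; ring
    rw [hlen]
    simp only [ubtMatch]
    by_cases h1 : e = "("
    · simp only [if_pos h1]
      refine ih (k + 1) (k :: st) d ?_ ?_ ?_
      · intro a ha; rcases List.mem_cons.1 ha with rfl | ha
        · omega
        · have := hst a ha; omega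
      · exact List.pairwise_cons.2 ⟨fun a ha => hst a ha, hp⟩
      · intro q hq; exact hd q (by omega)
    · by_cases h2 : e = ")"
      · simp only [if_neg h1, if_pos h2]
        cases st with
        | nil =>
          exact ih (k + 1) [] d (by simp) (by simp) (fun q hq => hd q (by omega))
        | cons t rest =>
          refine ih (k + 1) rest (d.insert t k) ?_ (List.pairwise_cons.1 hp).2 ?_
          · intro a ha; have := hst a (List.mem_cons_of_mem _ ha); omega
          · intro q hq
            rw [PySem.Dict.get?_insert_of_ne]
            · exact hd q (by omega)
            · have := hst t (List.mem_cons_self ..); omega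
      · simp only [if_neg h1, if_neg h2]
        exact ih (k + 1) st d (fun a ha => by have := hst a ha; omega) hp
          (fun q hq => hd q (by omega))

-- core: the final table entry of a stack element equals A's counter scan from here
theorem ubtMatch_core (es : List String) (k : Int) (st : List Int) (d : PySem.Dict Int Int)
    (mi : Nat) (s : Int) (hms : st[mi]? = some s)
    (hst : ∀ a ∈ st, a < k) (hp : st.Pairwise (· > ·))
    (hd : d.get? s = none) :
    (ubtMatch es k st d).2.get? s = optScan es ((mi : Int) + 1) k := by
  induction es generalizing k st d mi with
  | nil =>
    simp only [ubtMatch, optScan]; exact hd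
  | cons e es ih =>
    simp only [ubtMatch, optScan]
    by_cases h1 : e = "("
    · simp only [if_pos h1]
      have hc : ¬ ((mi : Int) + 1 + 1 = 0) := by omega
      rw [if_neg (by simpa using hc)]
      have hms' : (k :: st)[mi + 1]? = some s := by simpa using hms
      have := ih (k + 1) (k :: st) d (mi + 1) hms'
        (by intro a ha; rcases List.mem_cons.1 ha with rfl | ha; · omega
            · have := hst a ha; omega)
        (List.pairwise_cons.2 ⟨fun a ha => hst a ha, hp⟩) hd
      rw [this]; push_cast; ring_nf
    · by_cases h2 : e = ")"
      · simp only [if_neg h1, if_pos h2]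
        cases st with
        | nil => simp at hms
        | cons t rest =>
          cases mi with
          | zero =>
            simp only [List.getElem?_cons_zero, Option.some.injEq] at hms
            subst hms
            rw [if_pos (show ((0 : Nat) : Int) + 1 - 1 = 0 by norm_num)]
            exact ubtMatch_persist es (k + 1) rest (d.insert t k) t k
              (fun h => absurd ((List.pairwise_cons.1 hp).1 t h) (lt_irrefl t))
              (by have := hst t (List.mem_cons_self ..); omega)
              (fun a ha => by have := hst a (List.mem_cons_of_mem _ ha); omega)
              (PySem.Dict.get?_insert_self ..)
          | succ m =>
            simp only [List.getElem?_cons_succ] at hms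
            have hc : ¬ (((m + 1 : Nat) : Int) + 1 - 1 = 0) := by push_cast; omega
            rw [if_neg hc]
            have := ih (k + 1) rest (d.insert t k) m hms
              (fun a ha => by have := hst a (List.mem_cons_of_mem _ ha); omega)
              (List.pairwise_cons.1 hp).2
              (by rw [PySem.Dict.get?_insert_of_ne]
                  · exact hd
                  · have hsr : s ∈ rest := List.mem_of_getElem? hms
                    have := (List.pairwise_cons.1 hp).1 s hsr; omega)
            rw [this]; push_cast; ring_nf
      · simp only [if_neg h1, if_neg h2]
        have hc : ¬ ((mi : Int) + 1 = 0) := by omega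
        rw [if_neg hc]
        exact ih (k + 1) st d mi hms (fun a ha => by have := hst a ha; omega) hp hd

-- the j the table yields equals the j A's rescan yields
theorem j_eq (list : List String) (i : Int) (h1 : 1 ≤ i) (h2 : i < (list.length : Int) - 2)
    (hx : PySem.List.pyGetD list i "" = "(") :
    (((ubtMatch list 0 [] PySem.Dict.empty).2.get? i).getD ((list.length : Int) - 1)) =
      ubtScan (PySem.List.slice list (some (i + 1)) none) 1 (i + 1) := by
  have hit : i = (i.toNat : Int) := by omega
  rw [hit] at h2 hx ⊢
  generalize ht : i.toNat = t at h2 hx ⊢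
  have htlen : t + 2 < list.length := by omega
  have hsl : PySem.List.slice list (some ((t : Int) + 1)) none = list.drop (t + 1) := by
    rw [PySem.List.slice_from list (by omega)]
    have : ((t : Int) + 1).toNat = t + 1 := by omega
    rw [this]
  have hget : list[t]'(by omega) = "(" := by
    rw [PySem.List.pyGetD_eq_getElem list "" (by omega) (by push_cast; omega)] at hx
    simpa using hx
  have hm : ubtMatch list 0 [] PySem.Dict.empty
      = ubtMatch (list.drop t) ((list.take t).length : Int)
          (ubtMatch (list.take t) 0 [] PySem.Dict.empty).1
          (ubtMatch (list.take t) 0 [] PySem.Dict.empty).2 := by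
    conv_lhs => rw [(List.take_append_drop t list).symm]
    rw [ubtMatch_append]; ring_nf
  have hLt : ((list.take t).length : Int) = (t : Int) := by
    simp [List.length_take]; omega
  obtain ⟨hst, hp, hd⟩ := ubtMatch_inv (list.take t) 0 [] PySem.Dict.empty
    (by simp) (by simp) (fun q _ => by simp [pysem])
  rw [hLt] at hm
  simp only [zero_add, hLt] at hst hd
  have hdrop : list.drop t = list[t]'(by omega) :: list.drop (t + 1) :=
    (List.getElem_cons_drop (by omega)).symm
  rw [hdrop, hget] at hm
  have hstep : ubtMatch ("(" :: list.drop (t + 1)) (t : Int)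
      (ubtMatch (list.take t) 0 [] PySem.Dict.empty).1
      (ubtMatch (list.take t) 0 [] PySem.Dict.empty).2
      = ubtMatch (list.drop (t + 1)) ((t : Int) + 1)
          ((t : Int) :: (ubtMatch (list.take t) 0 [] PySem.Dict.empty).1)
          (ubtMatch (list.take t) 0 [] PySem.Dict.empty).2 := by
    simp [ubtMatch]
  rw [hstep] at hm
  have hcore := ubtMatch_core (list.drop (t + 1)) ((t : Int) + 1)
    ((t : Int) :: (ubtMatch (list.take t) 0 [] PySem.Dict.empty).1)
    (ubtMatch (list.take t) 0 [] PySem.Dict.empty).2 0 (t : Int)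
    (by simp)
    (by intro a ha; rcases List.mem_cons.1 ha with rfl | ha
        · omega
        · have := hst a ha; omega)
    (List.pairwise_cons.2 ⟨fun a ha => hst a ha, hp⟩)
    (hd (t : Int) (by omega))
  rw [hm, hcore, hsl, ubtScan_eq_optScan]
  have hlen : ((list.drop (t + 1)).length : Int) = (list.length : Int) - (t : Int) - 1 := by
    simp [List.length_drop]; omega
  rw [hlen]
  norm_num

-- ===== VERDICT (by name: the statement is the Claim_ definition above) =====
theorem unrooted_bin_tree_spec : Claim_equal_unrooted_bin_tree := by
  unfold Claim_equal_unrooted_bin_tree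
  intro list n_taxa _
  unfold Spec_unrooted_bin_tree unrooted_bin_tree unrooted_bin_tree_alt
  refine PySem.List.foldl_congr_mem _ _ _ _ ?_
  intro acc i hi
  obtain ⟨hi1, hi2⟩ := PySem.List.mem_pyRange_one.1 hi
  by_cases hx : PySem.List.pyGetD list i "" = "("
  · have hin : PySem.Str.isIn (PySem.List.pyGetD list i "") "(),;" = true := by
      rw [hx]; decide
    have hj := j_eq list i hi1 hi2 hx
    have hge := ubtScan_ge (PySem.List.slice list (some (i + 1)) none) 1 (i + 1)
    have hne : ((ubtMatch list 0 [] PySem.Dict.empty).2.get? i).getD ((list.length : Int) - 1) ≠ -1 := by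
      rw [hj]; omega
    simp [hx, ← hj, hne]
  · by_cases hin : PySem.Str.isIn (PySem.List.pyGetD list i "") "(),;" = true
    · simp at hin
      simp [hx, hin]
    · have hne : i ≠ -1 := by omega
      simp at hin
      simp [hx, hin, hne]
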